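-- pv_equiv track=rewrite | github.com/anttitevanlinna/agents-102 | curriculum/evals/scripts/sweep-banned.py | body_regions
-- ===== SOURCE A (Python) =====
-- def body_regions(text):
--     """Return (cut_line, fence_ranges). cut_line is None if absent."""
--     lines = text.splitlines()
--     cut = None
--     fences = []
--     in_fence = False
--     fence_start = None
--     for i, line in enumerate(lines, start=1):
--         s = line.strip()
--         if cut is None and s == "<!-- maintainer -->":
--             cut = i
--         if s.startswith("```"):
--             if not in_fence:
--                 in_fence = True
--                 fence_start = i
--             else:
--                 fences.append((fence_start, i))
--                 in_fence = False
--                 fence_start = None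
--     if in_fence and fence_start is not None:
--         fences.append((fence_start, len(lines)))
--     return cut, fences
-- ===== SOURCE B (Python) =====
-- def _pair(marks, nlines):
--     if len(marks) >= 2:
--         return [(marks[0], marks[1])] + _pair(marks[2:], nlines)
--     if len(marks) == 1:
--         return [(marks[0], nlines)]
--     return []
--
--
-- def body_regions(text):
--     """Return (cut_line, fence_ranges). cut_line is None if absent."""
--     lines = text.splitlines()
--     cut = None
--     for i, line in enumerate(lines, start=1):
--         if line.strip() == "<!-- maintainer -->":
--             cut = i
--             break
--     marks = [i for i, line in enumerate(lines, start=1)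
--              if line.strip().startswith("```")]
--     return cut, _pair(marks, len(lines))
-- ===== Notes on version B (the rewrite author's own statement) =====
-- stated objective: alternative
-- what changed: Replaced the single-pass in_fence/fence_start state machine with table collection plus pairing: one pass finds the first maintainer line, one pass collects all fence-marker line numbers, and a separate recursive step pairs consecutive marks (closing an unmatched trailing mark at len(lines)).
import Mathlib
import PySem

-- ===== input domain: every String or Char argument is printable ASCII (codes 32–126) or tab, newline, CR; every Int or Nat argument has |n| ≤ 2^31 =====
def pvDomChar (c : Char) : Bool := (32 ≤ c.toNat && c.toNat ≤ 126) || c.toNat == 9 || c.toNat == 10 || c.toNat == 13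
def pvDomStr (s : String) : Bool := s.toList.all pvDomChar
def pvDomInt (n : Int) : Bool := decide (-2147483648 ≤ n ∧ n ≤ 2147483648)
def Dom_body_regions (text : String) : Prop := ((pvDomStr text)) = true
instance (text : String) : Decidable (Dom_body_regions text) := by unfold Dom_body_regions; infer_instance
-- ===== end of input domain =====

-- B replaces A's in_fence/fence_start state machine by mark collection plus a separate pairing pass (alternative decomposition, same cost).


-- ===== PORT A =====
-- A's loop: state (cut, fences, in_fence, fence_start), 1-based index i.
-- (in the 'else' branch fence_start is always set in Python; .getD 0 is never the value used, see loop invariant in the proofs)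
def bodyLoopA (i : Int) (cut : Option Int) (fences : List (Int × Int))
    (inf : Bool) (fstart : Option Int) : List String → Option Int × List (Int × Int) × Bool × Option Int
  | [] => (cut, fences, inf, fstart)
  | l :: ls =>
    let s := PySem.Str.strip l
    let cut' := if cut = none ∧ s = "<!-- maintainer -->" then some i else cut
    if PySem.Str.startswith s "```" then
      if inf = false then bodyLoopA (i + 1) cut' fences true (some i) ls
      else bodyLoopA (i + 1) cut' (fences ++ [(fstart.getD 0, i)]) false none ls
    else bodyLoopA (i + 1) cut' fences inf fstart ls

def body_regions (text : String) : Option Int × (List (Int × Int)) :=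
  let lines := PySem.Str.splitlines text
  let r := bodyLoopA 1 none [] false none lines
  match r with
  | (cut, fences, inf, fstart) =>
    if inf = true then
      match fstart with
      | some fs => (cut, fences ++ [(fs, (lines.length : Int))])
      | none => (cut, fences)
    else (cut, fences)

-- ===== PORT B =====
-- first loop of B: first line whose strip equals the marker (break = stop)
def cutFromB (i : Int) : List String → Option Int
  | [] => none
  | l :: ls => if PySem.Str.strip l = "<!-- maintainer -->" then some i else cutFromB (i + 1) ls

-- B's comprehension: 1-based indices of lines whose strip starts with ```
def marksFromB (i : Int) : List String → List Int
  | [] => []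
  | l :: ls =>
    if PySem.Str.startswith (PySem.Str.strip l) "```" then i :: marksFromB (i + 1) ls
    else marksFromB (i + 1) ls

-- B's _pair helper
def pairB (nlines : Int) : List Int → List (Int × Int)
  | a :: b :: rest => (a, b) :: pairB nlines rest
  | [a] => [(a, nlines)]
  | [] => []

def body_regions_alt (text : String) : Option Int × (List (Int × Int)) :=
  let lines := PySem.Str.splitlines text
  (cutFromB 1 lines, pairB (lines.length : Int) (marksFromB 1 lines))

-- ===== PRECONDITION & SPEC =====
def Spec_body_regions (text : String) (out : Option Int × (List (Int × Int))) : Prop := out = body_regions_alt text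
instance (text : String) (out : Option Int × (List (Int × Int))) : Decidable (Spec_body_regions text out) := by unfold Spec_body_regions; infer_instance

-- ===== CLAIM (what is proved, stated in full; the proofs are below) =====
def Claim_equal_body_regions : Prop := ∀ (text : String), Dom_body_regions text → Spec_body_regions text (body_regions text)

-- ===== LEMMAS AND PROOFS =====

-- finalize = the post-loop fixup of A
def finalizeA (n : Int) : Option Int × List (Int × Int) × Bool × Option Int → Option Int × List (Int × Int)
  | (cut, fences, inf, fstart) =>
    if inf = true then
      match fstart with
      | some fs => (cut, fences ++ [(fs, n)])
      | none => (cut, fences)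
    else (cut, fences)

theorem bodyLoopA_char (ls : List String) :
    (∀ (i : Int) (cut : Option Int) (fences : List (Int × Int)) (n : Int),
      finalizeA n (bodyLoopA i cut fences false none ls)
        = (cut.or (cutFromB i ls), fences ++ pairB n (marksFromB i ls))) ∧
    (∀ (i : Int) (cut : Option Int) (fences : List (Int × Int)) (s : Int) (n : Int),
      finalizeA n (bodyLoopA i cut fences true (some s) ls)
        = (cut.or (cutFromB i ls), fences ++ pairB n (s :: marksFromB i ls))) := by
  induction ls with
  | nil =>
    constructor
    · intro i cut fences n
      simp [bodyLoopA, cutFromB, marksFromB, pairB, finalizeA]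
    · intro i cut fences s n
      simp [bodyLoopA, cutFromB, marksFromB, pairB, finalizeA]
  | cons l ls ih =>
    obtain ⟨ih0, ih1⟩ := ih
    have cutcase : ∀ (i : Int) (cut : Option Int),
        (if cut = none then
            (if cut = none ∧ PySem.Str.strip l = "<!-- maintainer -->" then some i else cut).or
              (if PySem.Str.strip l = "<!-- maintainer -->" then some i else cutFromB (i + 1) ls)
          else
            (if cut = none ∧ PySem.Str.strip l = "<!-- maintainer -->" then some i else cut).or
              (if PySem.Str.strip l = "<!-- maintainer -->" then some i else cutFromB (i + 1) ls))
        = cut.or (if PySem.Str.strip l = "<!-- maintainer -->" then some i else cutFromB (i + 1) ls) := by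
      intro i cut
      cases cut <;> by_cases h : PySem.Str.strip l = "<!-- maintainer -->" <;> simp [h, Option.or]
    constructor
    · intro i cut fences n
      by_cases hm : PySem.Str.startswith (PySem.Str.strip l) "```" = true
      · simp only [bodyLoopA, cutFromB, marksFromB, hm, if_true]
        rw [ih1]
        cases cut <;> by_cases h : PySem.Str.strip l = "<!-- maintainer -->" <;>
          simp [h, Option.or]
      · rw [Bool.not_eq_true] at hm
        simp only [bodyLoopA, cutFromB, marksFromB, hm, Bool.false_eq_true, if_false]
        rw [ih0]
        cases cut <;> by_cases h : PySem.Str.strip l = "<!-- maintainer -->" <;>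
          simp [h, Option.or]
    · intro i cut fences s n
      by_cases hm : PySem.Str.startswith (PySem.Str.strip l) "```" = true
      · simp only [bodyLoopA, cutFromB, marksFromB, hm, if_true, Option.getD]
        rw [if_neg (by decide), ih0]
        cases cut <;> by_cases h : PySem.Str.strip l = "<!-- maintainer -->" <;>
          simp [h, Option.or, pairB]
      · rw [Bool.not_eq_true] at hm
        simp only [bodyLoopA, cutFromB, marksFromB, hm, Bool.false_eq_true, if_false]
        rw [ih1]
        cases cut <;> by_cases h : PySem.Str.strip l = "<!-- maintainer -->" <;>
          simp [h, Option.or]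

-- ===== VERDICT (by name: the statement is the Claim_ definition above) =====
theorem body_regions_spec : Claim_equal_body_regions := by
  intro text _
  unfold Spec_body_regions body_regions body_regions_alt
  have h := (bodyLoopA_char (PySem.Str.splitlines text)).1 1 none [] ((PySem.Str.splitlines text).length : Int)
  simpa [finalizeA, Option.or] using h
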